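-- pv_equiv track=rewrite | github.com/totgokhung123/SMS-Microservices-Banking | data/raw/csv/trích xuất nhãn/processing_mapping_label/v2/v3/v3_placeholder_labels.py | value_type_guess
-- ===== SOURCE A (Python) =====
-- def value_type_guess(norm: str) -> str:
--     t = f" {norm} "
--     if " email " in t: return "EMAIL"
--     if " phone " in t: return "PHONE"
--     if " url " in t: return "URL"
--     if " address " in t: return "ADDRESS"
--     if " hours " in t: return "HOURS"
--     if any(x in t for x in [" pin "," cvv "," otp "," cardnumber "]): return "NUMBER"
--     return "TEXT"
-- ===== SOURCE B (Python) =====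
-- _RANK = {"email": 0, "phone": 1, "url": 2, "address": 3, "hours": 4,
--          "pin": 5, "cvv": 5, "otp": 5, "cardnumber": 5}
-- _LABEL = {0: "EMAIL", 1: "PHONE", 2: "URL", 3: "ADDRESS", 4: "HOURS", 5: "NUMBER"}
--
-- def value_type_guess(norm: str) -> str:
--     best = 6
--     for tok in norm.split(" "):
--         r = _RANK.get(tok, 6)
--         if r < best:
--             best = r
--     return _LABEL.get(best, "TEXT")
-- ===== Notes on version B (the rewrite author's own statement) =====
-- stated objective: alternative
-- what changed: Instead of testing nine padded keywords as substrings of the space-padded string via an if-chain, B splits the input into space-delimited tokens once, folds a minimum keyword rank over the tokens using a rank dictionary, and maps the best rank to its label.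
import Mathlib
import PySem

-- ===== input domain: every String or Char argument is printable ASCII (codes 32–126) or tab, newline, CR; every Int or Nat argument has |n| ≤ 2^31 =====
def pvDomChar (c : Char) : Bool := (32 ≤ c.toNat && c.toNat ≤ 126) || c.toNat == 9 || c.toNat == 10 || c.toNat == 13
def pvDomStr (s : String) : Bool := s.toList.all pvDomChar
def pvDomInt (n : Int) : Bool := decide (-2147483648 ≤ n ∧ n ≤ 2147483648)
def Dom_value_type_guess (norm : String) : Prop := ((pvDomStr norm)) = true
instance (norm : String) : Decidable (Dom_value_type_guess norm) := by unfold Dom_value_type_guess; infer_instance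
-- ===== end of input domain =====

-- B replaces A's padded-substring if-chain by a different algorithm: split the string into
-- space-delimited tokens once, fold a minimum keyword rank over them via a rank dictionary,
-- and map the best rank to its label (objective: alternative).

-- ===== PORT A =====
def value_type_guess (norm : String) : String :=
  let t := String.ofList (' ' :: norm.toList ++ [' '])
  if PySem.Str.isIn " email " t then "EMAIL"
  else if PySem.Str.isIn " phone " t then "PHONE"
  else if PySem.Str.isIn " url " t then "URL"
  else if PySem.Str.isIn " address " t then "ADDRESS"
  else if PySem.Str.isIn " hours " t then "HOURS"
  else if [" pin ", " cvv ", " otp ", " cardnumber "].any (fun x => PySem.Str.isIn x t) then "NUMBER"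
  else "TEXT"

-- ===== PORT B =====
def vtgRank : PySem.Dict String Int :=
  ⟨[("email", 0), ("phone", 1), ("url", 2), ("address", 3), ("hours", 4),
    ("pin", 5), ("cvv", 5), ("otp", 5), ("cardnumber", 5)]⟩

def vtgLabel : PySem.Dict Int String :=
  ⟨[(0, "EMAIL"), (1, "PHONE"), (2, "URL"), (3, "ADDRESS"), (4, "HOURS"), (5, "NUMBER")]⟩

-- norm.split(" ") is ported as List.splitOn ' ' on the code points (exact: Python splits at
-- every single space, keeping empty pieces, as List.splitOn does).
def value_type_guess_alt (norm : String) : String :=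
  let best := (norm.toList.splitOn ' ').foldl
    (fun best tok =>
      let r := vtgRank.getD (String.ofList tok) 6
      if r < best then r else best) (6 : Int)
  vtgLabel.getD best "TEXT"

-- ===== PRECONDITION & SPEC =====
def Spec_value_type_guess (norm : String) (out : String) : Prop := out = value_type_guess_alt norm
instance (norm : String) (out : String) : Decidable (Spec_value_type_guess norm out) := by unfold Spec_value_type_guess; infer_instance

-- ===== CLAIM (what is proved, stated in full; the proofs are below) =====
def Claim_equal_value_type_guess : Prop := ∀ (norm : String), Dom_value_type_guess norm → Spec_value_type_guess norm (value_type_guess norm)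

-- ===== LEMMAS AND PROOFS =====

-- padded-keyword substring test over the padded string ↔ keyword is a space-delimited token
theorem vtg_mem_join_infix (ts : List (List Char)) (kw : List Char) (h : kw ∈ ts) :
    (' ' :: kw ++ [' ']) <:+: (' ' :: [' '].intercalate ts ++ [' ']) := by
  induction ts with
  | nil => simp at h
  | cons t ts ih =>
    rcases List.mem_cons.mp h with rfl | h'
    · cases ts with
      | nil => simp [List.intercalate]
      | cons t2 ts2 =>
        have hJ : [' '].intercalate (kw :: t2 :: ts2) = kw ++ ' ' :: [' '].intercalate (t2 :: ts2) := by
          simp [List.intercalate, List.intersperse_cons₂]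
        rw [hJ]
        exact ⟨[], [' '].intercalate (t2 :: ts2) ++ [' '], by simp⟩
    · have hne : ts ≠ [] := List.ne_nil_of_mem h'
      obtain ⟨t2, ts2, rfl⟩ := List.exists_cons_of_ne_nil hne
      have hJ : [' '].intercalate (t :: t2 :: ts2) = t ++ ' ' :: [' '].intercalate (t2 :: ts2) := by
        simp [List.intercalate, List.intersperse_cons₂]
      rw [hJ]
      have hsuf : (' ' :: [' '].intercalate (t2 :: ts2) ++ [' '])
          <:+ (' ' :: (t ++ ' ' :: [' '].intercalate (t2 :: ts2)) ++ [' ']) :=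
        ⟨' ' :: t, by simp⟩
      exact (ih h').trans hsuf.isInfix

theorem vtg_mem_split_infix (kw s : List Char) (h : kw ∈ s.splitOnP (· == ' ')) :
    (' ' :: kw ++ [' ']) <:+: (' ' :: s ++ [' ']) := by
  have hjoin := List.intercalate_splitOn (xs := s) ' '
  rw [List.splitOn] at hjoin
  conv_rhs => rw [← hjoin]
  exact vtg_mem_join_infix _ _ h

theorem vtg_infix_mem_split (kw s : List Char) (hne : kw ≠ []) (hsp : ' ' ∉ kw)
    (h : (' ' :: kw ++ [' ']) <:+: (' ' :: s ++ [' '])) :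
    kw ∈ s.splitOnP (· == ' ') := by
  obtain ⟨a, b, hab⟩ := h
  have hL : (' ' :: s ++ [' ']).splitOnP (· == ' ')
      = [[]] ++ s.splitOnP (· == ' ') ++ [[]] := by
    have h1 : (' ' :: s ++ [' ']) = ([] : List Char) ++ ' ' :: (s ++ ' ' :: []) := by simp
    rw [h1, List.splitOnP_append_cons _ _ _ _ (by simp),
        List.splitOnP_append_cons _ _ _ _ (by simp)]
    simp [List.splitOnP_nil]
  have hkw : kw.splitOnP (· == ' ') = [kw] :=
    List.splitOnP_eq_single _ _ (by intro x hx; simp only [beq_iff_eq]; rintro rfl; exact hsp hx)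
  have hR : (a ++ (' ' :: kw ++ [' ']) ++ b).splitOnP (· == ' ')
      = a.splitOnP (· == ' ') ++ ([kw] ++ b.splitOnP (· == ' ')) := by
    have h2 : a ++ (' ' :: kw ++ [' ']) ++ b = a ++ ' ' :: (kw ++ ' ' :: b) := by simp
    rw [h2, List.splitOnP_append_cons _ _ _ _ (by simp),
        List.splitOnP_append_cons _ _ _ _ (by simp), hkw]
  rw [hab, hL] at hR
  have hmem : kw ∈ [[]] ++ s.splitOnP (· == ' ') ++ ([] : List Char) :: [] := by
    rw [hR]; simp
  simp only [List.mem_append, List.mem_cons, List.not_mem_nil, or_false] at hmem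
  rcases hmem with (h | h) | h
  · exact absurd h hne
  · exact h
  · exact absurd h hne

-- rank of a token, written out
def vtgRankFn (tok : List Char) : Int :=
  if tok = "email".toList then 0 else if tok = "phone".toList then 1
  else if tok = "url".toList then 2 else if tok = "address".toList then 3
  else if tok = "hours".toList then 4
  else if tok = "pin".toList ∨ tok = "cvv".toList ∨ tok = "otp".toList ∨ tok = "cardnumber".toList then 5
  else 6

theorem vtg_getD_rank (tok : List Char) : vtgRank.getD (String.ofList tok) 6 = vtgRankFn tok := by
  have key : ∀ (t : String), (t == String.ofList tok) = decide (tok = t.toList) := by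
    intro t
    rw [Bool.eq_iff_iff, beq_iff_eq, decide_eq_true_iff]
    constructor
    · rintro rfl; simp
    · rintro rfl; simp
  simp only [vtgRank, PySem.Dict.getD, PySem.Dict.get?, List.find?, key]
  unfold vtgRankFn
  split_ifs with h1 h2 h3 h4 h5 h6 <;> simp_all
  rcases h6 with rfl | rfl | rfl | rfl <;> simp

-- the chain value of a token list: the minimum rank present
def vtgChain (toks : List (List Char)) : Int :=
  if "email".toList ∈ toks then 0 else if "phone".toList ∈ toks then 1
  else if "url".toList ∈ toks then 2 else if "address".toList ∈ toks then 3
  else if "hours".toList ∈ toks then 4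
  else if "pin".toList ∈ toks ∨ "cvv".toList ∈ toks ∨ "otp".toList ∈ toks ∨ "cardnumber".toList ∈ toks then 5
  else 6

theorem vtgChain_bounds (toks : List (List Char)) : 0 ≤ vtgChain toks ∧ vtgChain toks ≤ 6 := by
  unfold vtgChain; split_ifs <;> omega

theorem vtgRankFn_bounds (tok : List Char) : 0 ≤ vtgRankFn tok ∧ vtgRankFn tok ≤ 6 := by
  unfold vtgRankFn; split_ifs <;> omega

set_option maxHeartbeats 4000000 in
theorem vtg_min_chain (t : List Char) (ts : List (List Char)) :
    min (vtgRankFn t) (vtgChain ts) = vtgChain (t :: ts) := by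
  unfold vtgRankFn vtgChain
  simp only [List.mem_cons]
  split_ifs <;> simp_all <;> try omega
  all_goals tauto

theorem vtg_fold_chain (toks : List (List Char)) (b : Int) (hb : b ≤ 6) :
    toks.foldl (fun best tok =>
      let r := vtgRank.getD (String.ofList tok) 6
      if r < best then r else best) b = min b (vtgChain toks) := by
  induction toks generalizing b with
  | nil => simp [vtgChain]; omega
  | cons t ts ih =>
    simp only [List.foldl_cons]
    have hstep : (let r := vtgRank.getD (String.ofList t) 6; if r < b then r else b)
        = min b (vtgRankFn t) := by
      simp only [vtg_getD_rank]; split_ifs <;> omega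
    rw [hstep, ih (min b (vtgRankFn t)) (by have := vtgRankFn_bounds t; omega)]
    rw [min_assoc, vtg_min_chain]

-- membership of a keyword token ↔ A's substring test, specialised through Str.isIn
theorem vtg_isIn_iff (kw : String) (norm : String) (hne : kw.toList ≠ []) (hsp : ' ' ∉ kw.toList) :
    PySem.Str.isIn (String.ofList (' ' :: kw.toList ++ [' '])) (String.ofList (' ' :: norm.toList ++ [' '])) = true
      ↔ kw.toList ∈ norm.toList.splitOnP (· == ' ') := by
  rw [PySem.Str.isIn_iff_infix]
  simp only [String.toList_ofList]
  constructor
  · exact vtg_infix_mem_split _ _ hne hsp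
  · exact vtg_mem_split_infix _ _

-- ===== VERDICT (by name: the statement is the Claim_ definition above) =====
theorem value_type_guess_spec : Claim_equal_value_type_guess := by
  intro norm _
  unfold Spec_value_type_guess value_type_guess value_type_guess_alt
  dsimp only
  have hsplit : norm.toList.splitOn ' ' = norm.toList.splitOnP (· == ' ') := rfl
  rw [hsplit, vtg_fold_chain _ 6 (by omega)]
  have hmin : min (6:Int) (vtgChain (norm.toList.splitOnP (· == ' '))) = vtgChain (norm.toList.splitOnP (· == ' ')) := by
    have := vtgChain_bounds (norm.toList.splitOnP (· == ' '))
    omega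
  rw [hmin]
  have hcvt : ∀ (kw pad : String), pad = String.ofList (' ' :: kw.toList ++ [' ']) → kw.toList ≠ [] → ' ' ∉ kw.toList →
      PySem.Str.isIn pad (String.ofList (' ' :: norm.toList ++ [' ']))
        = decide (kw.toList ∈ norm.toList.splitOnP (· == ' ')) := by
    intro kw pad hpad hne hsp
    rw [hpad, Bool.eq_iff_iff, decide_eq_true_iff]
    exact vtg_isIn_iff kw norm hne hsp
  rw [hcvt "email" " email " (by decide) (by decide) (by decide),
      hcvt "phone" " phone " (by decide) (by decide) (by decide),
      hcvt "url" " url " (by decide) (by decide) (by decide),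
      hcvt "address" " address " (by decide) (by decide) (by decide),
      hcvt "hours" " hours " (by decide) (by decide) (by decide)]
  simp only [List.any_cons, List.any_nil, Bool.or_false]
  rw [hcvt "pin" " pin " (by decide) (by decide) (by decide),
      hcvt "cvv" " cvv " (by decide) (by decide) (by decide),
      hcvt "otp" " otp " (by decide) (by decide) (by decide),
      hcvt "cardnumber" " cardnumber " (by decide) (by decide) (by decide)]
  unfold vtgChain
  simp only [Bool.or_eq_true, decide_eq_true_eq]
  split_ifs <;> decide
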